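-- pv_equiv track=rewrite | github.com/tvo1crash/Codewars | Simple Fun Middle Permutation/Solutions.py | middle_permutation
-- ===== SOURCE A (Python) =====
-- import math
--
-- def middle_permutation(string):
--     string = sorted(string)
--     n = len(string)
--
--     k = math.factorial(n) // 2 - 1
--
--     result = []
--     for i in range(n):
--         idx = k // math.factorial(n - 1 - i)
--         result.append(string[idx])
--         string.pop(idx)
--         k %= math.factorial(n - 1 - i)
--
--     return ''.join(result)
-- ===== SOURCE B (Python) =====
-- def middle_permutation(string):
--     # Closed form: with k = n!/2 - 1 the chosen indices are fixed —
--     # for odd n take the middle letter first, then for the (even) rest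
--     # take the letter just left of the middle, then the rest descending.
--     s = sorted(string)
--     n = len(s)
--     prefix = ''
--     if n % 2 == 1 and n > 0:
--         prefix = s.pop(n // 2)
--         n -= 1
--     if n == 0:
--         return prefix
--     prefix += s.pop(n // 2 - 1)
--     s.reverse()
--     return prefix + ''.join(s)
-- ===== Notes on version B (the rewrite author's own statement) =====
-- stated objective: faster
-- what changed: B drops A's per-step bignum factorial/floordiv/mod arithmetic entirely: since k = n!/2 - 1 fixes the chosen indices, B picks the middle letter (odd n), then the letter just left of the middle, then emits the remaining letters in descending order.
import Mathlib
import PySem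

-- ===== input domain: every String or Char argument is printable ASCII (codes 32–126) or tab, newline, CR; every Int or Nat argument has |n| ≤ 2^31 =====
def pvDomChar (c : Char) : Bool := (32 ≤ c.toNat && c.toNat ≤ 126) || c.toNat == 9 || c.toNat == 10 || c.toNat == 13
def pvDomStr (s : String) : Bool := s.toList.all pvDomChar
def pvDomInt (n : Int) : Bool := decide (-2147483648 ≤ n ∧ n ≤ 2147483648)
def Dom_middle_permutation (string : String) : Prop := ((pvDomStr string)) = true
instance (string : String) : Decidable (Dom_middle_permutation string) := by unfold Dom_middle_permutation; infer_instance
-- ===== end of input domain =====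

-- B replaces A's factorial/floordiv loop by the closed form the constant k = n!/2 - 1 forces:
-- middle letter (odd n), then the letter left of the middle, then the rest descending (objective: faster).

-- ===== PORT A =====
-- one iteration of A's `for i in range(n)` loop; state = (string, k, result)
def pvStepA (n : Nat) (st : List Char × Int × List Char) (i : Int) : List Char × Int × List Char :=
  -- idx = k // math.factorial(n - 1 - i)   (n - 1 - i ≥ 0 throughout the loop, so .toNat is exact)
  let f : Int := (Nat.factorial ((n : Int) - 1 - i).toNat : Int)
  let idx := PySem.Int.floordiv st.2.1 f
  -- result.append(string[idx]); string.pop(idx); k %= math.factorial(n - 1 - i)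
  match PySem.List.pyGet? st.1 idx, PySem.List.pop? st.1 idx with
  | some c, some pr => (pr.2, PySem.Int.mod st.2.1 f, st.2.2 ++ [c])
  | _, _ => st  -- unreachable: idx is always a valid Python index (proved in the lemmas below)

def middle_permutation (string : String) : String :=
  -- string = sorted(string)
  let s := PySem.List.sorted string.toList (fun c => c)
  -- n = len(string)
  let n := s.length
  -- k = math.factorial(n) // 2 - 1
  let k : Int := PySem.Int.floordiv (Nat.factorial n : Int) 2 - 1
  -- result = []; for i in range(n): ...
  let st := (PySem.List.pyRange 0 (n : Int)).foldl (pvStepA n) (s, k, [])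
  -- return ''.join(result)
  String.ofList st.2.2

-- ===== PORT B =====
def middle_permutation_alt (string : String) : String :=
  -- s = sorted(string); n = len(s); prefix = ''
  let s := PySem.List.sorted string.toList (fun c => c)
  let n := s.length
  let pfx : List Char := []
  -- if n % 2 == 1 and n > 0: prefix = s.pop(n // 2); n -= 1
  let (pfx, s, n) :=
    if n % 2 = 1 ∧ 0 < n then
      match PySem.List.pop? s ((n / 2 : Nat) : Int) with
      | some pr => (pfx ++ [pr.1], pr.2, n - 1)
      | none => (pfx, s, n)  -- unreachable: n // 2 is a valid index of a nonempty list
    else (pfx, s, n)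
  -- if n == 0: return prefix
  if n = 0 then String.ofList pfx
  else
    -- prefix += s.pop(n // 2 - 1); s.reverse(); return prefix + ''.join(s)
    match PySem.List.pop? s ((n / 2 - 1 : Nat) : Int) with
    | some pr => String.ofList (pfx ++ [pr.1] ++ pr.2.reverse)
    | none => String.ofList pfx  -- unreachable: here n is even and positive, so n // 2 - 1 is in range

-- ===== PRECONDITION & SPEC =====
def Spec_middle_permutation (string : String) (out : String) : Prop := out = middle_permutation_alt string
instance (string : String) (out : String) : Decidable (Spec_middle_permutation string out) := by unfold Spec_middle_permutation; infer_instance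

-- ===== CLAIM (what is proved, stated in full; the proofs are below) =====
def Claim_equal_middle_permutation : Prop := ∀ (string : String), Dom_middle_permutation string → Spec_middle_permutation string (middle_permutation string)

-- ===== LEMMAS AND PROOFS =====

-- A's loop, rephrased as structural recursion on the fuel = current length of the list
def runA : Nat → List Char → Int → List Char
  | 0, _, _ => []
  | m + 1, s, k =>
    match PySem.List.pop? s (PySem.Int.floordiv k (Nat.factorial m : Int)) with
    | some pr => pr.1 :: runA m pr.2 (PySem.Int.mod k (Nat.factorial m : Int))
    | none => []  -- unreachable under the invariant -1 ≤ k < (m+1)!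

lemma pop?_and_get (xs : List Char) (i : Int) (h : PySem.Raise.InRange xs.length i) :
    ∃ pr, PySem.List.pop? xs i = some pr ∧ PySem.List.pyGet? xs i = some pr.1 := by
  have hg : PySem.List.pyGet? xs i ≠ none :=
    fun hc => ((PySem.List.pyGet?_eq_none_iff xs i).mp hc) h
  unfold PySem.List.pop? PySem.List.pyGet? at *
  cases hk : PySem.List.pyIdx? xs.length i with
  | none => simp [hk] at hg
  | some k =>
    cases he : xs[k]? with
    | none => simp [hk, he] at hg
    | some c => exact ⟨(c, xs.eraseIdx k), by simp [he]⟩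

-- the index A computes is always a valid Python index, and the invariant -1 ≤ k < m! is preserved
lemma idx_inRange (m : Nat) (k : Int) (hk1 : -1 ≤ k) (hk2 : k < (Nat.factorial (m + 1) : Int)) :
    PySem.Raise.InRange (m + 1) (PySem.Int.floordiv k (Nat.factorial m : Int)) := by
  have hf : (0 : Int) < (Nat.factorial m : Int) := by exact_mod_cast Nat.factorial_pos m
  constructor
  · by_cases h0 : 0 ≤ k
    · have : (0 : Int) ≤ PySem.Int.floordiv k (Nat.factorial m : Int) :=
        (PySem.Int.le_floordiv_iff_mul_le hf).mpr (by simpa using h0)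
      omega
    · have hkm : k = -1 := by omega
      have : PySem.Int.floordiv k (Nat.factorial m : Int) = -1 := by
        rw [PySem.Int.floordiv_eq_iff_of_pos hf]; constructor <;> [nlinarith; simp [hkm]]
      omega
  · have : PySem.Int.floordiv k (Nat.factorial m : Int) < (m + 1 : Int) := by
      rw [PySem.Int.floordiv_lt_iff_lt_mul hf]
      calc k < (Nat.factorial (m + 1) : Int) := hk2
        _ = (m + 1 : Int) * (Nat.factorial m : Int) := by
              rw [Nat.factorial_succ]; push_cast; ring
    exact_mod_cast this

-- A's foldl over range(j, n) equals runA, appended to the accumulator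
lemma foldA (n : Nat) : ∀ (m j : Nat) (s : List Char) (k : Int) (acc : List Char),
    s.length = m → m + j = n → -1 ≤ k → k < (Nat.factorial m : Int) →
    ((PySem.List.pyRange (j : Int) (n : Int)).foldl (pvStepA n) (s, k, acc)).2.2
      = acc ++ runA m s k := by
  intro m
  induction m with
  | zero =>
    intro j s k acc hs hj _ _
    have : (n : Int) ≤ (j : Int) := by exact_mod_cast show n ≤ j by omega
    rw [PySem.List.pyRange_one_eq_nil this]
    simp [runA]
  | succ m ih =>
    intro j s k acc hs hj hk1 hk2
    have hjn : (j : Int) < (n : Int) := by exact_mod_cast (by omega : j < n)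
    rw [PySem.List.pyRange_one_cons hjn]
    have hfe : ((n : Int) - 1 - (j : Int)).toNat = m := by omega
    have hin : PySem.Raise.InRange s.length (PySem.Int.floordiv k (Nat.factorial m : Int)) := by
      rw [hs]; exact idx_inRange m k hk1 hk2
    obtain ⟨pr, hpop, hget⟩ := pop?_and_get s _ hin
    have hlen : pr.2.length = m := by
      have := PySem.List.length_of_pop?_eq_some s hpop; omega
    have hf : (0 : Int) < (Nat.factorial m : Int) := by exact_mod_cast Nat.factorial_pos m
    have hstep : pvStepA n (s, k, acc) (j : Int)
        = (pr.2, PySem.Int.mod k (Nat.factorial m : Int), acc ++ [pr.1]) := by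
      simp only [pvStepA, hfe, hpop, hget]
    rw [List.foldl_cons, hstep]
    have hj1 : (j : Int) + 1 = ((j + 1 : Nat) : Int) := by push_cast; ring
    rw [hj1, ih (j + 1) pr.2 _ _ hlen (by omega)
          (by have := PySem.Int.mod_nonneg k hf; omega) (PySem.Int.mod_lt k hf)]
    simp only [runA, hpop, List.append_assoc, List.singleton_append]

-- with k = m! - 1 the loop picks the last element at every step: it reverses the list
lemma runA_last : ∀ (m : Nat) (s : List Char), s.length = m →
    runA m s ((Nat.factorial m : Int) - 1) = s.reverse := by
  intro m
  induction m with
  | zero => intro s hs; simp [List.length_eq_zero_iff.mp hs, runA]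
  | succ m ih =>
    intro s hs
    rcases List.eq_nil_or_concat s with rfl | ⟨ys, y, rfl⟩
    · simp at hs
    have hys : ys.length = m := by simp [List.concat_eq_append] at hs ⊢; omega
    have hf : (0 : Int) < (Nat.factorial m : Int) := by exact_mod_cast Nat.factorial_pos m
    have hfs : (Nat.factorial (m + 1) : Int) = (m + 1 : Int) * (Nat.factorial m : Int) := by
      rw [Nat.factorial_succ]; push_cast; ring
    have hidx : PySem.Int.floordiv ((Nat.factorial (m + 1) : Int) - 1) (Nat.factorial m : Int)
        = (m : Int) := by
      rw [PySem.Int.floordiv_eq_iff_of_pos hf]; constructor <;> nlinarith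
    have hmod : PySem.Int.mod ((Nat.factorial (m + 1) : Int) - 1) (Nat.factorial m : Int)
        = (Nat.factorial m : Int) - 1 := by
      have := PySem.Int.floordiv_mul_add_mod ((Nat.factorial (m + 1) : Int) - 1)
        (Nat.factorial m : Int)
      rw [hidx] at this; nlinarith
    have hlt : ys.length < (ys ++ [y]).length := by simp
    have hpop : PySem.List.pop? (ys ++ [y]) ((m : Nat) : Int) = some (y, ys) := by
      rw [← hys]
      rw [PySem.List.pop?_natCast (ys ++ [y]) ys.length hlt]
      rw [List.eraseIdx_append_of_length_le (Nat.le_refl _)]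
      simp
    simp only [List.concat_eq_append]
    simp only [runA]
    rw [hidx, hpop, hmod]
    simp [ih ys hys]

-- with k = t·(2t-1)! - 1 on a list of length 2t the loop picks index t-1 and then reverses
lemma runA_even (t : Nat) (ht : 1 ≤ t) (s : List Char) (hs : s.length = 2 * t)
    (hlt : t - 1 < s.length) :
    runA (2 * t) s ((t : Int) * (Nat.factorial (2 * t - 1) : Int) - 1)
      = s[t - 1]'hlt :: (s.eraseIdx (t - 1)).reverse := by
  have hm : 2 * t = (2 * t - 1) + 1 := by omega
  have hf : (0 : Int) < (Nat.factorial (2 * t - 1) : Int) := by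
    exact_mod_cast Nat.factorial_pos _
  have hidx : PySem.Int.floordiv ((t : Int) * (Nat.factorial (2 * t - 1) : Int) - 1)
      (Nat.factorial (2 * t - 1) : Int) = ((t - 1 : Nat) : Int) := by
    rw [PySem.Int.floordiv_eq_iff_of_pos hf]
    have hc : ((t - 1 : Nat) : Int) = (t : Int) - 1 := by omega
    rw [hc]; constructor <;> nlinarith
  have hmod : PySem.Int.mod ((t : Int) * (Nat.factorial (2 * t - 1) : Int) - 1)
      (Nat.factorial (2 * t - 1) : Int) = (Nat.factorial (2 * t - 1) : Int) - 1 := by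
    have := PySem.Int.floordiv_mul_add_mod ((t : Int) * (Nat.factorial (2 * t - 1) : Int) - 1)
      (Nat.factorial (2 * t - 1) : Int)
    rw [hidx] at this
    have hc : ((t - 1 : Nat) : Int) = (t : Int) - 1 := by omega
    rw [hc] at this; nlinarith
  have hpop : PySem.List.pop? s ((t - 1 : Nat) : Int)
      = some (s[t - 1]'hlt, s.eraseIdx (t - 1)) := PySem.List.pop?_natCast s (t - 1) hlt
  have hlen : (s.eraseIdx (t - 1)).length = 2 * t - 1 := by
    rw [List.length_eraseIdx_of_lt hlt]; omega
  obtain ⟨m, hm2⟩ : ∃ m, 2 * t = m + 1 := ⟨2 * t - 1, by omega⟩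
  have hm1 : 2 * t - 1 = m := by omega
  rw [hm1] at hidx hmod hlen
  rw [hm1, hm2]
  simp only [runA]
  rw [hidx, hpop, hmod]
  simp [runA_last m (s.eraseIdx (t - 1)) hlen]

-- n! / 2 for even n = 2t, as a Nat identity
lemma fact_half_even (t : Nat) (ht : 1 ≤ t) :
    Nat.factorial (2 * t) / 2 = t * Nat.factorial (2 * t - 1) := by
  obtain ⟨m, hm⟩ : ∃ m, 2 * t = m + 1 := ⟨2 * t - 1, by omega⟩
  have h1 : Nat.factorial (2 * t) = 2 * (t * Nat.factorial m) := by
    rw [hm, Nat.factorial_succ, ← hm]; ring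
  rw [show 2 * t - 1 = m by omega, h1, Nat.mul_div_cancel_left _ (by norm_num)]

-- n! / 2 for odd n = 2t+1 (t ≥ 1), as a Nat identity
lemma fact_half_odd (t : Nat) (ht : 1 ≤ t) :
    Nat.factorial (2 * t + 1) / 2
      = t * Nat.factorial (2 * t) + t * Nat.factorial (2 * t - 1) := by
  have h2 : Nat.factorial (2 * t) = 2 * t * Nat.factorial (2 * t - 1) := by
    obtain ⟨m, hm⟩ : ∃ m, 2 * t = m + 1 := ⟨2 * t - 1, by omega⟩
    rw [show 2 * t - 1 = m from by omega, hm, Nat.factorial_succ]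
  have h1 : Nat.factorial (2 * t + 1)
      = 2 * ((2 * t + 1) * (t * Nat.factorial (2 * t - 1))) := by
    rw [Nat.factorial_succ, h2]; ring
  rw [h1, Nat.mul_div_cancel_left _ (by norm_num), h2]; ring

-- the A port's loop result, in closed form via foldA
lemma aCore (l : List Char) :
    ((PySem.List.pyRange 0 (l.length : Int)).foldl (pvStepA l.length)
        (l, PySem.Int.floordiv (Nat.factorial l.length : Int) 2 - 1, [])).2.2
      = runA l.length l (((Nat.factorial l.length / 2 : Nat) : Int) - 1) := by
  have hk0 : PySem.Int.floordiv ((Nat.factorial l.length : Nat) : Int) 2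
      = ((Nat.factorial l.length / 2 : Nat) : Int) := by
    exact_mod_cast PySem.Int.floordiv_natCast (Nat.factorial l.length) 2
  have hA := foldA l.length l.length 0 l
      (((Nat.factorial l.length / 2 : Nat) : Int) - 1) [] rfl (by omega)
      (by have := Nat.factorial_pos l.length; omega)
      (by
        have := Nat.div_le_self (Nat.factorial l.length) 2
        have := Nat.factorial_pos l.length
        omega)
  rw [hk0]
  simpa using hA

-- (2t)! = 2t·(2t-1)!, the factorial step used to bound A's index in the odd case
lemma fact_double (t : Nat) (ht : 1 ≤ t) :
    Nat.factorial (2 * t) = 2 * t * Nat.factorial (2 * t - 1) := by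
  obtain ⟨m, hm⟩ : ∃ m, 2 * t = m + 1 := ⟨2 * t - 1, by omega⟩
  rw [show 2 * t - 1 = m from by omega, hm, Nat.factorial_succ]

-- ===== VERDICT (by name: the statement is the Claim_ definition above) =====
theorem middle_permutation_spec : Claim_equal_middle_permutation := by
  intro string _
  unfold Spec_middle_permutation middle_permutation middle_permutation_alt
  dsimp only
  rw [aCore]
  set l := PySem.List.sorted string.toList (fun c => c) with hl
  rcases Nat.even_or_odd l.length with he | ho
  · obtain ⟨t, hth⟩ := he
    have hth2 : l.length = 2 * t := by omega
    by_cases ht0 : t = 0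
    · -- n = 0: empty string
      have : l = [] := List.length_eq_zero_iff.mp (by omega)
      rw [this]
      simp [runA]
    · -- n = 2t even, t ≥ 1
      have ht1 : 1 ≤ t := by omega
      have hlt : t - 1 < l.length := by omega
      rw [show Nat.factorial l.length / 2 = t * Nat.factorial (2 * t - 1) from by
            rw [hth2]; exact fact_half_even t ht1]
      rw [show ((t * Nat.factorial (2 * t - 1) : Nat) : Int) - 1
            = (t : Int) * ((Nat.factorial (2 * t - 1) : Nat) : Int) - 1 from by push_cast; ring]
      rw [show l.length = 2 * t from hth2]
      rw [runA_even t ht1 l hth2 hlt]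
      rw [if_neg (by omega : ¬(2 * t % 2 = 1 ∧ 0 < 2 * t))]
      dsimp only
      rw [if_neg (by omega : ¬(2 * t = 0))]
      rw [show 2 * t / 2 - 1 = t - 1 from by omega]
      rw [PySem.List.pop?_natCast l (t - 1) hlt]
      simp
  · obtain ⟨t, hth⟩ := ho
    have hth2 : l.length = 2 * t + 1 := by omega
    by_cases ht0 : t = 0
    · -- n = 1: a single character
      subst ht0
      obtain ⟨c, hc⟩ := List.length_eq_one_iff.mp (by omega : l.length = 1)
      rw [hc]
      have hp : PySem.List.pop? [c] (-1) = some (c, []) := by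
        simpa using PySem.List.pop?_last ([] : List Char) c
      have hp0 : PySem.List.pop? [c] (0 : Int) = some (c, []) := PySem.List.pop?_zero_cons c []
      simp [runA, Nat.factorial, hp, hp0]
    · -- n = 2t+1 odd, t ≥ 1
      have ht1 : 1 ≤ t := by omega
      have hltt : t < l.length := by omega
      have hlen1 : (l.eraseIdx t).length = 2 * t := by
        rw [List.length_eraseIdx_of_lt hltt]; omega
      have hlt1 : t - 1 < (l.eraseIdx t).length := by omega
      have hf1 : (0 : Int) < (Nat.factorial (2 * t - 1) : Int) := by
        exact_mod_cast Nat.factorial_pos _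
      have hf2 : (0 : Int) < (Nat.factorial (2 * t) : Int) := by
        exact_mod_cast Nat.factorial_pos _
      have hF : (Nat.factorial (2 * t) : Int)
          = 2 * (t : Int) * (Nat.factorial (2 * t - 1) : Int) := by
        exact_mod_cast congrArg (Nat.cast : Nat → Int) (fact_double t ht1)
      rw [show Nat.factorial l.length / 2
            = t * Nat.factorial (2 * t) + t * Nat.factorial (2 * t - 1) from by
            rw [hth2]; exact fact_half_odd t ht1]
      rw [show ((t * Nat.factorial (2 * t) + t * Nat.factorial (2 * t - 1) : Nat) : Int) - 1
            = (t : Int) * (Nat.factorial (2 * t) : Int)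
              + (t : Int) * (Nat.factorial (2 * t - 1) : Int) - 1 from by push_cast; ring]
      rw [show l.length = 2 * t + 1 from hth2]
      have hidx : PySem.Int.floordiv
          ((t : Int) * (Nat.factorial (2 * t) : Int)
            + (t : Int) * (Nat.factorial (2 * t - 1) : Int) - 1)
          (Nat.factorial (2 * t) : Int) = ((t : Nat) : Int) := by
        rw [PySem.Int.floordiv_eq_iff_of_pos hf2]
        constructor <;> nlinarith
      have hmod : PySem.Int.mod
          ((t : Int) * (Nat.factorial (2 * t) : Int)
            + (t : Int) * (Nat.factorial (2 * t - 1) : Int) - 1)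
          (Nat.factorial (2 * t) : Int)
          = (t : Int) * (Nat.factorial (2 * t - 1) : Int) - 1 := by
        have := PySem.Int.floordiv_mul_add_mod
          ((t : Int) * (Nat.factorial (2 * t) : Int)
            + (t : Int) * (Nat.factorial (2 * t - 1) : Int) - 1)
          (Nat.factorial (2 * t) : Int)
        rw [hidx] at this; nlinarith
      simp only [runA]
      rw [hidx, PySem.List.pop?_natCast l t hltt, hmod]
      dsimp only
      rw [runA_even t ht1 (l.eraseIdx t) hlen1 hlt1]
      rw [if_pos (by omega : (2 * t + 1) % 2 = 1 ∧ 0 < 2 * t + 1)]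
      rw [show (2 * t + 1) / 2 = t from by omega]
      rw [PySem.List.pop?_natCast l t hltt]
      dsimp only
      rw [show 2 * t + 1 - 1 = 2 * t from by omega]
      rw [if_neg (by omega : ¬(2 * t = 0))]
      rw [show 2 * t / 2 - 1 = t - 1 from by omega]
      rw [PySem.List.pop?_natCast (l.eraseIdx t) (t - 1) hlt1]
      simp
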